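-- pv_equiv track=rewrite | github.com/urjaman/kbb | kbb.py | htmlize
-- ===== SOURCE A (Python) =====
-- def htmlize(s):
--     escapes = {
--         '&': '&amp;',
--         '>': '&gt;',
--         '<': '&lt;'
--     }
--     prefix = '<html><head></head><body><pre>\n'
--     suffix = '</pre></body></html>\n'
--     for k in escapes:
--         s = s.replace(k, escapes[k])
--     return prefix + s + suffix
-- ===== SOURCE B (Python) =====
-- def htmlize(s):
--     escapes = {
--         '&': '&amp;',
--         '>': '&gt;',
--         '<': '&lt;'
--     }
--     prefix = '<html><head></head><body><pre>\n'
--     suffix = '</pre></body></html>\n'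
--     return prefix + ''.join(escapes.get(c, c) for c in s) + suffix
-- ===== Notes on version B (the rewrite author's own statement) =====
-- stated objective: simpler
-- what changed: B escapes in one character-by-character pass with a dict lookup instead of A's three sequential full-string .replace() scans.
import Mathlib
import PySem

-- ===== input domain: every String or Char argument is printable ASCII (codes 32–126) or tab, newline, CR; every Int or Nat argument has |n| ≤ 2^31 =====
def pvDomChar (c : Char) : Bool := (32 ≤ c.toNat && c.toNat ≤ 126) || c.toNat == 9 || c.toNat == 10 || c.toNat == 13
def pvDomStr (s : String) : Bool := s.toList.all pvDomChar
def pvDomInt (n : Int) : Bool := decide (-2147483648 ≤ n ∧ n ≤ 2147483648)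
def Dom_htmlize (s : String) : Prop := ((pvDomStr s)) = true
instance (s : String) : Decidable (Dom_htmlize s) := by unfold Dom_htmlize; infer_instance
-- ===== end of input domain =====

-- B replaces A's three sequential full-string replace passes with one per-character pass over a lookup table (objective: simpler).

-- ===== PORT A =====
-- A: for k in {'&','>','<'} (insertion order): s = s.replace(k, escapes[k]); then prefix + s + suffix
def htmlize (s : String) : String :=
  let s1 := PySem.Str.replace s "&" "&amp;"
  let s2 := PySem.Str.replace s1 ">" "&gt;"
  let s3 := PySem.Str.replace s2 "<" "&lt;"
  "<html><head></head><body><pre>\n" ++ s3 ++ "</pre></body></html>\n"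

-- ===== PORT B =====
-- B: escapes as a dict Char → String; body = ''.join(escapes.get(c, c) for c in s)
def htmlizeEscapes : PySem.Dict Char String := ⟨[('&', "&amp;"), ('>', "&gt;"), ('<', "&lt;")]⟩

def htmlize_alt (s : String) : String :=
  "<html><head></head><body><pre>\n"
    ++ PySem.Str.join "" (s.toList.map (fun c => PySem.Dict.getD htmlizeEscapes c (String.ofList [c])))
    ++ "</pre></body></html>\n"

-- ===== PRECONDITION & SPEC =====
def Spec_htmlize (s : String) (out : String) : Prop := out = htmlize_alt s
instance (s : String) (out : String) : Decidable (Spec_htmlize s out) := by unfold Spec_htmlize; infer_instance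

-- ===== CLAIM (what is proved, stated in full; the proofs are below) =====
def Claim_equal_htmlize : Prop := ∀ (s : String), Dom_htmlize s → Spec_htmlize s (htmlize s)

-- ===== LEMMAS AND PROOFS =====

-- single-character replace is a flatMap over the characters
theorem replace_go_single (k : Char) (new : List Char) :
    ∀ (fuel : Nat) (l acc : List Char), l.length ≤ fuel →
      PySem.Chars.replace.go [k] new fuel l acc
        = acc.reverse ++ l.flatMap (fun c => if c = k then new else [c]) := by
  intro fuel
  induction fuel with
  | zero =>
    intro l acc h
    have : l = [] := List.eq_nil_of_length_eq_zero (Nat.le_zero.mp h)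
    subst this
    simp [PySem.Chars.replace.go]
  | succ n ih =>
    intro l acc h
    cases l with
    | nil => simp [PySem.Chars.replace.go]
    | cons c t =>
      by_cases hc : c = k
      · subst hc
        have hp : List.isPrefixOf [c] (c :: t) = true := by
          simp [List.isPrefixOf]
        rw [PySem.Chars.replace.go, if_pos hp,
            show List.drop ([c] : List Char).length (c :: t) = t from rfl]
        rw [ih t (new.reverse ++ acc) (by simpa using Nat.lt_succ_iff.mp (by simpa using h))]
        simp
      · have hp : List.isPrefixOf [k] (c :: t) = false := by
          simp [List.isPrefixOf]
          intro hck; exact absurd hck.symm hc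
        rw [PySem.Chars.replace.go, if_neg (by rw [hp]; exact Bool.false_ne_true)]
        rw [ih t (c :: acc) (by simpa using Nat.lt_succ_iff.mp (by simpa using h))]
        simp [hc]

theorem replace_single (k : Char) (new : List Char) (s : List Char) :
    PySem.Chars.replace s [k] new = s.flatMap (fun c => if c = k then new else [c]) := by
  rw [PySem.Chars.replace, if_neg (by simp : ¬ (List.isEmpty [k] = true))]
  simpa using replace_go_single k new s.length s [] (le_refl _)

-- the composite of the three per-character escapes equals the single table lookup, one char at a time
theorem esc_char (c : Char) :
    ((if c = '&' then "&amp;".toList else [c]).flatMap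
        (fun c => if c = '>' then "&gt;".toList else [c])).flatMap
        (fun c => if c = '<' then "&lt;".toList else [c])
      = (PySem.Dict.getD htmlizeEscapes c (String.ofList [c])).toList := by
  by_cases h1 : c = '&'
  · subst h1; decide
  · by_cases h2 : c = '>'
    · subst h2; decide
    · by_cases h3 : c = '<'
      · subst h3; decide
      · simp [if_neg h1, if_neg h2, if_neg h3, PySem.Dict.getD, PySem.Dict.get?,
              htmlizeEscapes, List.find?,
              (beq_eq_false_iff_ne.mpr (fun e => h1 e.symm) : ('&' == c) = false),
              (beq_eq_false_iff_ne.mpr (fun e => h2 e.symm) : ('>' == c) = false),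
              (beq_eq_false_iff_ne.mpr (fun e => h3 e.symm) : ('<' == c) = false)]

theorem escapes_comp (s : List Char) :
    (((s.flatMap (fun c => if c = '&' then "&amp;".toList else [c])).flatMap
        (fun c => if c = '>' then "&gt;".toList else [c])).flatMap
        (fun c => if c = '<' then "&lt;".toList else [c]))
      = (s.map (fun c => PySem.Dict.getD htmlizeEscapes c (String.ofList [c]))).flatMap
          String.toList := by
  induction s with
  | nil => simp
  | cons c t ih =>
    simp only [List.flatMap_cons, List.flatMap_append, List.map_cons]
    rw [ih]
    congr 1
    exact esc_char c

theorem join_empty_sep : ∀ (l : List (List Char)), PySem.Chars.join [] l = l.flatten := by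
  intro l
  induction l with
  | nil => simp [PySem.Chars.join, List.intercalate]
  | cons a t ih =>
    cases t with
    | nil => simp [PySem.Chars.join, List.intercalate]
    | cons b t' =>
      simp only [PySem.Chars.join, List.intercalate] at ih ⊢
      rw [show List.intersperse ([] : List Char) (a::b::t') = a :: [] :: List.intersperse [] (b::t') by
            simp [List.intersperse]]
      simp only [List.flatten_cons] at ih ⊢
      rw [ih]
      simp

-- ===== VERDICT (by name: the statement is the Claim_ definition above) =====
theorem htmlize_spec : Claim_equal_htmlize := by
  intro s _
  unfold Spec_htmlize htmlize htmlize_alt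
  apply String.toList_injective
  simp only [String.toList_append, PySem.Str.toList_replace, PySem.Str.toList_join]
  congr 1
  congr 1
  rw [show ("&" : String).toList = ['&'] from rfl, show (">" : String).toList = ['>'] from rfl,
      show ("<" : String).toList = ['<'] from rfl]
  rw [replace_single, replace_single, replace_single, escapes_comp,
      show ("" : String).toList = [] from rfl, join_empty_sep]
  simp [List.flatMap]
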